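-- pv_equiv track=rewrite | github.com/TDennisCS/CSC352 | CardClassifier.py | GenerateMulliganModel
-- ===== SOURCE A (Python) =====
-- def GenerateMulliganModel(upper, lower): #generates a model to be simulated
--     model_dict = {}
--     temp = {}
--     bound = upper - lower
--
--     for i in range(bound+1):
--         good_values = [] # clears the good values list
--         for j in range(lower, (upper + 1 - i)):
--             good_values.append(j) # adds the good values for this mulligan count
--         temp = {i: tuple(good_values)}
--         model_dict = model_dict | temp
--     return model_dict
-- ===== SOURCE B (Python) =====
-- def GenerateMulliganModel(upper, lower):  # back-to-front: grow the tuple from the smallest one, collect pairs in descending key order, then reverse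
--     pairs = []
--     current = ()
--     for i in range(upper - lower, -1, -1):
--         current = current + (upper - i,)
--         pairs.append((i, current))
--     return dict(reversed(pairs))
-- ===== Notes on version B (the rewrite author's own statement) =====
-- stated objective: alternative
-- what changed: A rebuilds each value tuple with an inner append loop over its full range and merges a singleton dict per ascending key; B iterates keys in DESCENDING order growing one tuple by a single element per step (each tuple extends the previous smaller one), collects (key, tuple) pairs back-to-front, and builds the dict once from the reversed pair list.
import Mathlib
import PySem

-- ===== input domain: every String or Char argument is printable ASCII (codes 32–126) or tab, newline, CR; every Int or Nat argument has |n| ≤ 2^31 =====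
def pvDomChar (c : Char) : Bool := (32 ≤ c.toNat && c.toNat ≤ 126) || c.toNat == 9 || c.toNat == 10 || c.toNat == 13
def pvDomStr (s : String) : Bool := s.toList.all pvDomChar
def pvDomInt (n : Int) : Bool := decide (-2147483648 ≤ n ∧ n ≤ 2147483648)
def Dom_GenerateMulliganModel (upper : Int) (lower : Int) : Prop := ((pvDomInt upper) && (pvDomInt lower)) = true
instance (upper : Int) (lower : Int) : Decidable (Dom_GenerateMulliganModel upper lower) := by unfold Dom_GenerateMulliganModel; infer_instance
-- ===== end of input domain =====

-- B iterates keys in descending order, growing one list by a single element per step and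
-- collecting the pairs back-to-front, then builds the dict from the reversed pair list;
-- a genuinely different traversal from A's ascending rebuild-each-range loop. Proved equal.


-- ===== PORT A =====
-- 'model_dict | {i: tuple(good_values)}': dict-union with a one-entry right operand is
-- exactly Dict.insert (overwrite-or-append).
def GenerateMulliganModel (upper : Int) (lower : Int) : List (Int × List Int) :=
  ((PySem.List.pyRange 0 ((upper - lower) + 1) 1).foldl
    (fun (model_dict : PySem.Dict Int (List Int)) i =>
      let good_values := (PySem.List.pyRange lower (upper + 1 - i) 1).foldl
        (fun acc j => acc ++ [j]) []
      model_dict.insert i good_values)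
    PySem.Dict.empty).items

-- ===== PORT B =====
-- 'current + (upper - i,)' appends one element; 'dict(reversed(pairs))' inserts the reversed
-- pairs one by one into a fresh dict.
def GenerateMulliganModel_alt (upper : Int) (lower : Int) : List (Int × List Int) :=
  let s := (PySem.List.pyRange (upper - lower) (-1) (-1)).foldl
    (fun (s : List (Int × List Int) × List Int) i =>
      let current := s.2 ++ [upper - i]
      (s.1 ++ [(i, current)], current)) ([], [])
  ((s.1.reverse).foldl (fun (d : PySem.Dict Int (List Int)) p => d.insert p.1 p.2)
    PySem.Dict.empty).items

-- ===== PRECONDITION & SPEC =====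
def Spec_GenerateMulliganModel (upper : Int) (lower : Int) (out : List (Int × List Int)) : Prop := out = GenerateMulliganModel_alt upper lower
instance (upper : Int) (lower : Int) (out : List (Int × List Int)) : Decidable (Spec_GenerateMulliganModel upper lower out) := by unfold Spec_GenerateMulliganModel; infer_instance

-- ===== CLAIM (what is proved, stated in full; the proofs are below) =====
def Claim_equal_GenerateMulliganModel : Prop := ∀ (upper : Int) (lower : Int), Dom_GenerateMulliganModel upper lower → Spec_GenerateMulliganModel upper lower (GenerateMulliganModel upper lower)

-- ===== LEMMAS AND PROOFS =====

-- the common target: the pairs (i, range(lower, upper+1-i)) for i in ascending order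
def pvTarget (upper lower : Int) : List (Int × List Int) :=
  (PySem.List.pyRange 0 ((upper - lower) + 1) 1).map
    (fun i => (i, PySem.List.pyRange lower (upper + 1 - i) 1))

-- A's inner append loop just reproduces its range
theorem foldl_append_singleton (l : List Int) : ∀ (acc : List Int),
    l.foldl (fun acc j => acc ++ [j]) acc = acc ++ l := by
  induction l with
  | nil => simp
  | cons x xs ih => intro acc; simp [List.foldl, ih]

-- inserting a list of pairs with fresh, pairwise-distinct keys appends it to the items
theorem items_foldl_insert (ps : List (Int × List Int)) :
    ∀ (d : PySem.Dict Int (List Int)),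
    (∀ p ∈ ps, d.contains p.1 = false) → (ps.map Prod.fst).Nodup →
    (ps.foldl (fun d p => d.insert p.1 p.2) d).items = d.items ++ ps := by
  induction ps with
  | nil => intro d _ _; simp
  | cons p rest ih =>
    intro d hfresh hnodup
    simp only [List.map_cons, List.nodup_cons] at hnodup
    have hfresh' : ∀ q ∈ rest, (d.insert p.1 p.2).contains q.1 = false := by
      intro q hq
      have h1 : (q.1 == p.1) = false := by
        simp only [beq_eq_false_iff_ne]
        intro h
        exact hnodup.1 (h ▸ List.mem_map_of_mem hq)
      rw [PySem.Dict.contains_insert, h1, hfresh q (List.mem_cons_of_mem _ hq)]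
      rfl
    simp only [List.foldl_cons]
    rw [ih (d.insert p.1 p.2) hfresh' hnodup.2,
      PySem.Dict.items_insert_of_not_contains d p.2 (hfresh p List.mem_cons_self)]
    simp

-- the target's keys are exactly the ascending range, hence nodup
theorem target_keys_nodup (upper lower : Int) :
    ((pvTarget upper lower).map Prod.fst).Nodup := by
  unfold pvTarget
  rw [show ((PySem.List.pyRange 0 ((upper - lower) + 1) 1).map
        (fun i => (i, PySem.List.pyRange lower (upper + 1 - i) 1))).map Prod.fst
      = PySem.List.pyRange 0 ((upper - lower) + 1) 1 by
    rw [List.map_map,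
      show (Prod.fst ∘ fun i : Int => (i, PySem.List.pyRange lower (upper + 1 - i) 1)) = id
        from rfl,
      List.map_id]]
  exact PySem.List.nodup_pyRange_one 0 ((upper - lower) + 1)

-- A's fold equals the target list
theorem portA_eq_target (upper lower : Int) :
    GenerateMulliganModel upper lower = pvTarget upper lower := by
  unfold GenerateMulliganModel
  simp only [foldl_append_singleton, List.nil_append]
  rw [show ((PySem.List.pyRange 0 ((upper - lower) + 1) 1).foldl
        (fun (d : PySem.Dict Int (List Int)) i =>
          d.insert i (PySem.List.pyRange lower (upper + 1 - i) 1)) PySem.Dict.empty)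
      = ((pvTarget upper lower).foldl
          (fun (d : PySem.Dict Int (List Int)) p => d.insert p.1 p.2) PySem.Dict.empty)
      from by unfold pvTarget; rw [List.foldl_map]]
  rw [items_foldl_insert _ PySem.Dict.empty
      (by intro p _; exact PySem.Dict.contains_empty _) (target_keys_nodup upper lower)]
  simp [PySem.Dict.empty]

-- B's descending loop produces the target pairs in reverse order
theorem portB_loop (upper lower : Int) :
    ∀ (n : Nat) (i : Int) (pairs : List (Int × List Int)) (cur : List Int),
    n = (i + 1).toNat → i ≤ upper - lower →
    cur = PySem.List.pyRange lower (upper - i) 1 →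
    ((PySem.List.pyRange i (-1) (-1)).foldl
      (fun (s : List (Int × List Int) × List Int) i =>
        (s.1 ++ [(i, s.2 ++ [upper - i])], s.2 ++ [upper - i]))
      (pairs, cur)).1
    = pairs ++ (PySem.List.pyRange i (-1) (-1)).map
        (fun i => (i, PySem.List.pyRange lower (upper + 1 - i) 1)) := by
  intro n
  induction n with
  | zero =>
    intro i pairs cur hn _ _
    rw [PySem.List.pyRange_neg_one_eq_nil (by omega)]
    simp
  | succ m ih =>
    intro i pairs cur hn hle hcur
    subst hcur
    rw [PySem.List.pyRange_neg_one_cons (by omega)]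
    simp only [List.foldl_cons, List.map_cons]
    have hgrow : PySem.List.pyRange lower (upper - i) 1 ++ [upper - i]
        = PySem.List.pyRange lower (upper - (i - 1)) 1 := by
      rw [show upper - (i - 1) = (upper - i) + 1 by ring,
        PySem.List.pyRange_one_succ_right (by omega)]
    rw [hgrow, ih (i - 1) (pairs ++ [(i, PySem.List.pyRange lower (upper - (i - 1)) 1)])
        _ (by omega) (by omega) rfl]
    have h1 : upper - (i - 1) = upper + 1 - i := by ring
    simp [h1]

theorem portB_eq_target (upper lower : Int) :
    GenerateMulliganModel_alt upper lower = pvTarget upper lower := by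
  have hloop := portB_loop upper lower ((upper - lower) + 1).toNat (upper - lower) [] []
    rfl le_rfl (by rw [PySem.List.pyRange_one_eq_nil (by omega)])
  unfold GenerateMulliganModel_alt
  dsimp only
  rw [hloop, List.nil_append, PySem.List.pyRange_neg_one_eq_reverse,
    show (-1 : Int) + 1 = 0 by ring, List.map_reverse, List.reverse_reverse]
  rw [items_foldl_insert _ PySem.Dict.empty
      (by intro p _; exact PySem.Dict.contains_empty _)
      (by exact target_keys_nodup upper lower)]
  unfold pvTarget
  simp [PySem.Dict.empty]

-- ===== VERDICT (by name: the statement is the Claim_ definition above) =====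
theorem GenerateMulliganModel_spec : Claim_equal_GenerateMulliganModel := by
  intro upper lower _
  unfold Spec_GenerateMulliganModel
  rw [portA_eq_target, portB_eq_target]
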